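-- pv_equiv track=rewrite | github.com/voizlav/md2html | project.py | parse_unordered
-- ===== SOURCE A (Python) =====
-- def parse_unordered(lines: list):
--     """
--     Parse unordered list markup in the given list of lines and return with HTML tags
--     """
--     result, count = [], False
--     for line in lines:
--         if not line.startswith("- ") and count:
--             result.append("</ul>")
--         if line.startswith("- "):
--             if not result or result and not count:
--                 result.append("<ul>")
--             count = True
--             result.append(f"<li>{line[2:]}</li>")
--             continue
--         count = False
--         result.append(line)
--     if result and count:
--         result.append("</ul>")
--     return result
-- ===== SOURCE B (Python) =====
-- def parse_unordered(lines: list):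
--     """
--     Parse unordered list markup in the given list of lines and return with HTML tags
--     """
--     out = []
--     i, n = 0, len(lines)
--     while i < n:
--         if lines[i].startswith("- "):
--             out.append("<ul>")
--             while i < n and lines[i].startswith("- "):
--                 out.append(f"<li>{lines[i][2:]}</li>")
--                 i += 1
--             out.append("</ul>")
--         else:
--             out.append(lines[i])
--             i += 1
--     return out
-- ===== Notes on version B (the rewrite author's own statement) =====
-- stated objective: alternative
-- what changed: B replaces A's per-line boolean state flag (toggled to decide when to emit <ul>/</ul>) with an explicit index that consumes each contiguous '- ' run in an inner while-loop, emitting <ul>, the run's <li> items and </ul> in one go.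
import Mathlib
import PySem

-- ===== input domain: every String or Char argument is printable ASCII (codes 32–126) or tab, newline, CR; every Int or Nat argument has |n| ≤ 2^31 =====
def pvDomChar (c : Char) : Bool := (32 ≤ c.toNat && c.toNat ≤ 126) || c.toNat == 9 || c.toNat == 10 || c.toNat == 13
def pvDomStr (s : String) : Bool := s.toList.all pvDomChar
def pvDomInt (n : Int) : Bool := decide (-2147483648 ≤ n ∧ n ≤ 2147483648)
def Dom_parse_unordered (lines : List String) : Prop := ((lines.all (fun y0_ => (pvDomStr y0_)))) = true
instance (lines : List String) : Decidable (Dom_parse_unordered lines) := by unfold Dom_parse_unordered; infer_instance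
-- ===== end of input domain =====

-- B rewrites A's boolean-state line loop as an explicit consumption of each contiguous
-- "- " run (inner loop per run); same cost, different decomposition ("alternative").

-- line.startswith("- ") and f"<li>{line[2:]}</li>", shared vocabulary of both ports
def pvIsItem (line : String) : Bool := PySem.Str.startswith line "- "
def pvLi (line : String) : String := "<li>" ++ PySem.Str.slice line (some 2) none ++ "</li>"

-- ===== PORT A =====
-- the for-loop of A, state = (result, count)
def pvLoopA : List String → List String → Bool → List String
  | [], result, count =>
      -- trailing 'if result and count: result.append("</ul>")'
      if result ≠ [] ∧ count = true then result ++ ["</ul>"] else result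
  | line :: rest, result, count =>
      let result1 := if ¬ pvIsItem line = true ∧ count = true then result ++ ["</ul>"] else result
      if pvIsItem line = true then
        let result2 := if result1 = [] ∨ (result1 ≠ [] ∧ count = false) then result1 ++ ["<ul>"] else result1
        pvLoopA rest (result2 ++ [pvLi line]) true
      else
        pvLoopA rest (result1 ++ [line]) false

def parse_unordered (lines : List String) : List String := pvLoopA lines [] false

-- ===== PORT B =====
-- termination helper for the run-consuming recursion
theorem pvDropWhile_len_lt {α : Type} (p : α → Bool) (l : α) (r : List α) (h : p l = true) :
    (List.dropWhile p (l :: r)).length < (l :: r).length := by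
  simp only [List.dropWhile, h]
  exact Nat.lt_succ_of_le (List.length_dropWhile_le p r)

-- the index loop of B: on a '- ' line, emit the whole run (inner while) at once
def pvAltGo : List String → List String
  | [] => []
  | l :: r =>
    if h : pvIsItem l = true then
      "<ul>" :: ((l :: r).takeWhile pvIsItem).map pvLi ++ "</ul>" :: pvAltGo ((l :: r).dropWhile pvIsItem)
    else l :: pvAltGo r
termination_by xs => xs.length
decreasing_by
  · exact pvDropWhile_len_lt pvIsItem l r h
  · simp

def parse_unordered_alt (lines : List String) : List String := pvAltGo lines

-- ===== PRECONDITION & SPEC =====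
def Spec_parse_unordered (lines : List String) (out : List String) : Prop := out = parse_unordered_alt lines
instance (lines : List String) (out : List String) : Decidable (Spec_parse_unordered lines out) := by unfold Spec_parse_unordered; infer_instance

-- ===== CLAIM (what is proved, stated in full; the proofs are below) =====
def Claim_equal_parse_unordered : Prop := ∀ (lines : List String), Dom_parse_unordered lines → Spec_parse_unordered lines (parse_unordered lines)

-- ===== LEMMAS AND PROOFS =====

-- B's output from the middle of a run whose "<ul>" is already emitted
def pvInRun (rest : List String) : List String :=
  (rest.takeWhile pvIsItem).map pvLi ++ "</ul>" :: pvAltGo (rest.dropWhile pvIsItem)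

theorem pvLoopA_key : ∀ rest : List String,
    (∀ result, pvLoopA rest result false = result ++ pvAltGo rest) ∧
    (∀ result, result ≠ [] → pvLoopA rest result true = result ++ pvInRun rest) := by
  intro rest
  induction rest with
  | nil =>
      constructor
      · intro result; simp [pvLoopA, pvAltGo]
      · intro result hne; simp [pvLoopA, pvInRun, pvAltGo, hne]
  | cons l r ih =>
      obtain ⟨ihF, ihT⟩ := ih
      constructor
      · intro result
        by_cases h : pvIsItem l = true
        · have e1 := ihT (result ++ ["<ul>"] ++ [pvLi l]) (by simp)
          by_cases hr : result = [] <;>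
            simp [pvLoopA, h, hr, pvAltGo, pvInRun] at * <;> simp [e1]
        · simp [pvLoopA, h, ihF, pvAltGo]
      · intro result hne
        by_cases h : pvIsItem l = true
        · have e1 := ihT (result ++ [pvLi l]) (by simp)
          simp [pvLoopA, h, hne, e1, pvInRun]
        · have e1 := ihF (result ++ ["</ul>", l])
          simp [pvLoopA, h, e1, pvInRun, pvAltGo]

-- ===== VERDICT (by name: the statement is the Claim_ definition above) =====
theorem parse_unordered_spec : Claim_equal_parse_unordered := by
  intro lines _
  unfold Spec_parse_unordered parse_unordered parse_unordered_alt
  simpa using (pvLoopA_key lines).1 []
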